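-- pv_equiv track=rewrite | github.com/Simeon-JAA/brawl | functions/players.py | check_player_tag
-- ===== SOURCE A (Python) =====
-- def format_player_tag(player_tag: str) -> str:
--     """Formats player tag"""
--
--     if not isinstance(player_tag, str):
--         raise Exception("Error: Player tag must be a string format!")
--
--     player_tag = player_tag.strip().replace("#", "").upper()
--
--     if not player_tag:
--         raise Exception("Error: Player tag must not be empty!")
--
--     return player_tag
--
-- def check_player_tag(player_tag: str) -> bool:
--     """Returns true if player tage is accepted"""
--
--     player_tag = format_player_tag(player_tag)
--
--     if len(player_tag) < 3:
--         return False
--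
--     allowed_characters = ['P', 'Y', 'L', 'Q', 'G', 'O', 'R', 'J', 'C', 'U', 'V', '0', '2', '8', '9']
--
--     for character in player_tag:
--         if character not in allowed_characters:
--             return False
--
--     return True
-- ===== SOURCE B (Python) =====
-- def check_player_tag(player_tag: str) -> bool:
--     tag = player_tag.strip().replace("#", "").upper()
--     if len(tag) < 3:
--         return False
--     # count occurrences of each allowed character; the counts add up to
--     # len(tag) exactly when no other character occurs (allowed chars are distinct)
--     return sum(tag.count(c) for c in "PYLQGORJCUV0289") == len(tag)
-- ===== Notes on version B (the rewrite author's own statement) =====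
-- stated objective: alternative
-- what changed: B inverts the traversal: instead of scanning the tag with an early-exit membership test per character, it iterates over the 15 allowed characters, sums tag.count(c) for each, and accepts iff the counts total len(tag) (valid since the allowed characters are distinct, so their counts partition a valid tag).
-- crash fix: A raises Exception when the tag is empty after strip/#-removal (e.g. '#', ' ', ''); B returns False there. — e.g. on check_player_tag("#"): A raises Exception, B returns false
import Mathlib
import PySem

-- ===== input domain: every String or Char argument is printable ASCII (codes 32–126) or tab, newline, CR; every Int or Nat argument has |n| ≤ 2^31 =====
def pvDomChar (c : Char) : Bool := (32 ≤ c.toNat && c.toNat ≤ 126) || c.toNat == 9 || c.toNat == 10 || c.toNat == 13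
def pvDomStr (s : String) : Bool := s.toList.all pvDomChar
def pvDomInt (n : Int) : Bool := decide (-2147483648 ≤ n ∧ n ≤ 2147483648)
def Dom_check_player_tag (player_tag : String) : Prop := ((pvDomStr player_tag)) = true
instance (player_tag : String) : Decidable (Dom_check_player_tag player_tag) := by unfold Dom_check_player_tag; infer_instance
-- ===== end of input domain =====

-- B inverts the traversal: it iterates over the 15 allowed characters summing their
-- occurrence counts in the tag and accepts iff the total equals the tag's length
-- (alternative; same cost class). A raises where the formatted tag is empty; those
-- inputs are outside Pre_ (B returns False there, see Raises_).

-- ===== PORT A =====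
-- format_player_tag: strip, remove '#', upper (the empty case raises → excluded by Pre_)
def pvFmt (player_tag : String) : String :=
  PySem.Str.upper (PySem.Str.replace (PySem.Str.strip player_tag) "#" "")

-- the 'for character in player_tag: if character not in allowed_characters: return False' loop
def pvChkLoop (allowed : List Char) : List Char → Bool
  | [] => true
  | c :: rest => if !(allowed.contains c) then false else pvChkLoop allowed rest

def check_player_tag (player_tag : String) : Bool :=
  let t := pvFmt player_tag
  if PySem.Str.len t < 3 then false
  else
    let allowed : List Char := ['P','Y','L','Q','G','O','R','J','C','U','V','0','2','8','9']
    pvChkLoop allowed t.toList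

-- ===== PORT B =====
-- sum(tag.count(c) for c in "PYLQGORJCUV0289") == len(tag)
-- (tag.count(c) for a single character c is the character count, ported as List.count)
def check_player_tag_alt (player_tag : String) : Bool :=
  let t := pvFmt player_tag
  if PySem.Str.len t < 3 then false
  else
    decide ((("PYLQGORJCUV0289".toList).map (fun c => (t.toList.count c : Int))).sum
              = PySem.Str.len t)

-- ===== PRECONDITION & SPEC =====
-- Pre_ excludes exactly the inputs on which A's format_player_tag raises: the tag is
-- empty after strip / '#'-removal.
def Pre_check_player_tag (player_tag : String) : Prop := pvFmt player_tag ≠ ""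
instance (player_tag : String) : Decidable (Pre_check_player_tag player_tag) := by
  unfold Pre_check_player_tag; infer_instance

def pvWitness_check_player_tag : String := "#PY2"

-- A raises Exception when the tag is empty after strip/'#'-removal; B returns False there.
def Raises_check_player_tag (player_tag : String) : Prop := pvFmt player_tag = ""
instance (player_tag : String) : Decidable (Raises_check_player_tag player_tag) := by
  unfold Raises_check_player_tag; infer_instance
def pvRaiseWitness_check_player_tag : String := "#"
def pvRaiseWitnessOut_check_player_tag : Bool := false

def Spec_check_player_tag (player_tag : String) (out : Bool) : Prop := out = check_player_tag_alt player_tag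
instance (player_tag : String) (out : Bool) : Decidable (Spec_check_player_tag player_tag out) := by unfold Spec_check_player_tag; infer_instance

-- ===== CLAIM =====
def Claim_equal_check_player_tag : Prop := ∀ (player_tag : String), Dom_check_player_tag player_tag → Pre_check_player_tag player_tag → Spec_check_player_tag player_tag (check_player_tag player_tag)
def Claim_raises_check_player_tag : Prop := (∀ (player_tag : String), Dom_check_player_tag player_tag → Raises_check_player_tag player_tag → ¬ Pre_check_player_tag player_tag) ∧ (Dom_check_player_tag (pvRaiseWitness_check_player_tag) ∧ Raises_check_player_tag (pvRaiseWitness_check_player_tag) ∧ check_player_tag_alt (pvRaiseWitness_check_player_tag) = pvRaiseWitnessOut_check_player_tag)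

-- ===== LEMMAS AND PROOFS =====

theorem pvChkLoop_iff (allowed l : List Char) :
    pvChkLoop allowed l = true ↔ ∀ c ∈ l, c ∈ allowed := by
  induction l with
  | nil => simp [pvChkLoop]
  | cons c rest ih =>
      simp only [pvChkLoop, List.mem_cons]
      by_cases h : c ∈ allowed
      · simp [h, ih]
      · simp [h]

-- summing each allowed character's count equals counting the characters that are allowed
theorem pvIndSum (x : Char) (A : List Char) :
    (A.map fun c => if c == x then (1 : Int) else 0).sum = (A.count x : Int) := by
  induction A with
  | nil => simp
  | cons a A ih =>
      simp only [List.map_cons, List.sum_cons, ih, List.count_cons]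
      by_cases h : a = x
      · subst h; simp; omega
      · simp [h]

theorem pvSumCounts (A : List Char) (hA : A.Nodup) (l : List Char) :
    (A.map fun c => (l.count c : Int)).sum = (l.countP (fun x => A.contains x) : Int) := by
  induction l with
  | nil => simp
  | cons x l ih =>
      have hcnt : ∀ c : Char, ((x :: l).count c : Int)
          = (l.count c : Int) + (if c == x then (1 : Int) else 0) := by
        intro c
        by_cases h : c = x
        · subst h; simp
        · have h2 : ¬ x = c := fun e => h e.symm
          simp [h, h2]
      have hAx : (A.map fun c => if c == x then (1 : Int) else 0).sum
          = if A.contains x then (1 : Int) else 0 := by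
        rw [pvIndSum]
        by_cases h : x ∈ A
        · rw [List.count_eq_one_of_mem hA h]; simp [h]
        · rw [List.count_eq_zero_of_not_mem h]; simp [h]
      calc (A.map fun c => ((x :: l).count c : Int)).sum
          = (A.map fun c => (l.count c : Int) + (if c == x then (1:Int) else 0)).sum := by
            apply congrArg; exact List.map_congr_left (fun c _ => hcnt c)
        _ = (A.map fun c => (l.count c : Int)).sum
              + (A.map fun c => if c == x then (1:Int) else 0).sum := by
            rw [← List.sum_map_add]
        _ = (l.countP (fun x => A.contains x) : Int)
              + (if A.contains x then (1:Int) else 0) := by rw [ih, hAx]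
        _ = ((x :: l).countP (fun x => A.contains x) : Int) := by
            simp only [List.countP_cons]
            by_cases h : A.contains x <;> simp only [h, if_true] <;> push_cast <;> ring

theorem pvChars : "PYLQGORJCUV0289".toList =
    ['P','Y','L','Q','G','O','R','J','C','U','V','0','2','8','9'] := by decide

-- ===== VERDICT =====
theorem check_player_tag_spec : Claim_equal_check_player_tag := by
  intro player_tag _ _
  unfold Spec_check_player_tag
  show check_player_tag player_tag = check_player_tag_alt player_tag
  simp only [check_player_tag, check_player_tag_alt]
  by_cases h : PySem.Str.len (pvFmt player_tag) < 3
  · rw [if_pos h, if_pos h]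
  · rw [if_neg h, if_neg h]
    have hnd : ("PYLQGORJCUV0289".toList).Nodup := by rw [pvChars]; decide
    have hset : ∀ c : Char, ("PYLQGORJCUV0289".toList).contains c = true
        ↔ c ∈ ['P','Y','L','Q','G','O','R','J','C','U','V','0','2','8','9'] := by
      intro c; rw [pvChars]; exact List.contains_iff_mem
    have hlen : PySem.Str.len (pvFmt player_tag)
        = ((pvFmt player_tag).toList.length : Int) := by
      rw [PySem.Str.len_eq]
    rw [Bool.eq_iff_iff, pvChkLoop_iff, decide_eq_true_iff,
        pvSumCounts _ hnd ((pvFmt player_tag).toList), hlen,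
        Nat.cast_inj, List.countP_eq_length]
    exact ⟨fun hall c hc => (hset c).2 (hall c hc), fun hall c hc => (hset c).1 (hall c hc)⟩

theorem check_player_tag_raises : Claim_raises_check_player_tag := by
  unfold Claim_raises_check_player_tag
  exact ⟨fun p _ hr => by simpa [Pre_check_player_tag, Raises_check_player_tag] using hr, by decide⟩

-- self-check: the raise witness really lies in Raises_ and B's port returns the stated literal there
theorem pvRaiseWitness_ok :
    Raises_check_player_tag pvRaiseWitness_check_player_tag ∧
      check_player_tag_alt pvRaiseWitness_check_player_tag = pvRaiseWitnessOut_check_player_tag :=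
  ⟨check_player_tag_raises.2.2.1, check_player_tag_raises.2.2.2⟩
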